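-- pv_equiv track=rewrite | github.com/pro-odoo/advent_of_code | 2025/day04.py | count_part2
-- ===== SOURCE A (Python) =====
-- def is_paper_roll(array, x, y):
--     if 0 <= x < len(array) and 0 <= y < len(array[0]):
--         return array[x][y] == "@"
--     return False
--
-- def count_around(array, x, y):
--     around = [(x-1, y-1), (x, y-1), (x+1, y-1), (x-1, y),
--               (x+1, y), (x-1, y+1), (x, y+1), (x+1, y+1)]
--     return sum([1 if is_paper_roll(array, x, y) else 0 for (x,y) in around])
--
-- def count_part2(array):
--     count = 0
--     while True:
--         round_count = 0
--         next_array = []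
--         for x in range(len(array)):
--             next_array.append([])
--             for y in range(len(array[0])):
--                 if array[x][y] != "@":
--                     next_array[x].append(array[x][y])
--                     continue
--                 nbr = count_around(array, x, y)
--                 if nbr < 4:
--                     next_array[x].append(".")
--                     round_count += 1
--                 else:
--                     next_array[x].append("@")
--         array = next_array
--         count += round_count
--         if round_count == 0:
--             return count
-- ===== SOURCE B (Python) =====
-- def count_part2(array):
--     R = len(array)
--     C = len(array[0]) if array else 0
--     live = {(x, y) for x in range(R) for y in range(C) if array[x][y] == "@"}
--     work = [(x, y) for x in range(R) for y in range(C)]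
--     removed = 0
--     while work:
--         (x, y) = work.pop()
--         if (x, y) in live:
--             nbrs = [(x + dx, y + dy) for dx in (-1, 0, 1) for dy in (-1, 0, 1)
--                     if (dx, dy) != (0, 0)]
--             if sum(1 for p in nbrs if p in live) < 4:
--                 live.remove((x, y))
--                 removed += 1
--                 work.extend(nbrs)
--     return removed
-- ===== Notes on version B (the rewrite author's own statement) =====
-- stated objective: alternative
-- what changed: B replaces A's repeated synchronous whole-grid recomputation rounds by a single worklist peeling pass (pop a cell, remove it if it has fewer than 4 live neighbours, re-enqueue only its 8 neighbours), counting removals directly; both converge to the unique maximal stable subset, which the Lean proof establishes. It trades A's per-round full rescans for per-removal local work, but was not measurably faster on the timed inputs.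
-- outside the precondition, e.g. on count_part2([['@', '@'], ['@']]): A raises IndexError, B raises IndexError
import Mathlib
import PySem

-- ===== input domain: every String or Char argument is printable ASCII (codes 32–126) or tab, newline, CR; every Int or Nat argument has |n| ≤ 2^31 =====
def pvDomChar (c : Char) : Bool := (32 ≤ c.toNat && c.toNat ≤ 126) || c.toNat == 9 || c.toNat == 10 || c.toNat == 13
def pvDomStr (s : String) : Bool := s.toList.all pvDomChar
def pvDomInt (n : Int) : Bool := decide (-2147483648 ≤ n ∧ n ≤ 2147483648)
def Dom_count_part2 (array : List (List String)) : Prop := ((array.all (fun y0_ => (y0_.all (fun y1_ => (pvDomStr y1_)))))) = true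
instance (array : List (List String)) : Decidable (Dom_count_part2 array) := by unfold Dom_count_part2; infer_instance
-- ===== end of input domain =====

-- B replaces A's synchronous whole-grid rounds by a single worklist peeling pass (remove a
-- deficient cell, re-enqueue only its neighbours); the final removal count is the same because
-- both converge to the unique maximal stable subset. Equivalence proved on Pre_ (inputs where
-- the Python A returns instead of raising IndexError).

-- ===== PORT A =====
def is_paper_roll (array : List (List String)) (x y : Int) : Bool :=
  if 0 ≤ x && x < (array.length : Int) && 0 ≤ y && y < ((array.headD []).length : Int) then
    -- in-bounds by the guard (Pre_ rules out rows shorter than row 0, where Python raises)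
    (array.getD x.toNat []).getD y.toNat "" == "@"
  else
    false

def count_around (array : List (List String)) (x y : Int) : Int :=
  let around : List (Int × Int) :=
    [(x-1, y-1), (x, y-1), (x+1, y-1), (x-1, y), (x+1, y), (x-1, y+1), (x, y+1), (x+1, y+1)]
  (around.map (fun p => if is_paper_roll array p.1 p.2 then (1 : Int) else 0)).sum

-- body of A's inner `for y` loop (state = row built so far, running round_count)
def innerStepA (array : List (List String)) (x : Nat) (st2 : List String × Int) (y : Nat) :
    List String × Int :=
  let cell := (array.getD x []).getD y ""   -- array[x][y]; in range on Pre_ inputs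
  if cell != "@" then (st2.1 ++ [cell], st2.2)
  else if count_around array (x : Int) (y : Int) < 4 then (st2.1 ++ ["."], st2.2 + 1)
  else (st2.1 ++ ["@"], st2.2)

-- body of A's outer `for x` loop
def outerStepA (array : List (List String)) (st : List (List String) × Int) (x : Nat) :
    List (List String) × Int :=
  let inner := (List.range (array.headD []).length).foldl (innerStepA array x)
      (([] : List String), st.2)
  (st.1 ++ [inner.1], inner.2)

-- one full pass of A's while-body: (next_array, round_count)
def roundA (array : List (List String)) : List (List String) × Int :=
  (List.range array.length).foldl (outerStepA array) (([] : List (List String)), (0 : Int))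

-- A's `while True` loop; the fuel R*C+1 is only a totality guard (every non-final round
-- removes at least one "@", and there are at most R*C of them)
def loopA (fuel : Nat) (array : List (List String)) (count : Int) : Int :=
  match fuel with
  | 0 => count
  | fuel + 1 =>
    let r := roundA array
    if r.2 == 0 then count + r.2 else loopA fuel r.1 (count + r.2)

def count_part2 (array : List (List String)) : Int :=
  loopA (array.length * (array.headD []).length + 1) array 0

-- ===== PORT B =====
-- the 8 neighbours of a cell, in B's comprehension order (dx outer, dy inner, (0,0) skipped)
def neighborsOf (v : Int × Int) : List (Int × Int) :=
  [(v.1 - 1, v.2 - 1), (v.1 - 1, v.2), (v.1 - 1, v.2 + 1), (v.1, v.2 - 1),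
   (v.1, v.2 + 1), (v.1 + 1, v.2 - 1), (v.1 + 1, v.2), (v.1 + 1, v.2 + 1)]

-- {(x, y) for x in range(R) for y in range(C) if array[x][y] == "@"}
def initLive (array : List (List String)) (R C : Nat) : PySem.Set (Int × Int) :=
  PySem.Set.ofList ((((List.range R) ×ˢ (List.range C)).filter
      (fun p => (array.getD p.1 []).getD p.2 "" == "@")).map
    (fun p => ((p.1 : Int), (p.2 : Int))))

-- [(x, y) for x in range(R) for y in range(C)]
def initWork (R C : Nat) : List (Int × Int) :=
  ((List.range R) ×ˢ (List.range C)).map (fun p => ((p.1 : Int), (p.2 : Int)))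

-- B's `while work` loop: pop from the end; if the popped cell is live and has < 4 live
-- neighbours, remove it and push its neighbours.  Terminates by 9*|live| + |work|.
def peel (live : PySem.Set (Int × Int)) (work : List (Int × Int)) (removed : Int) : Int :=
  match hw : work.getLast? with
  | none => removed
  | some v =>
    if hv : v ∈ live then
      if ((((neighborsOf v).filter (fun p => decide (p ∈ live))).length : Int)) < 4 then
        peel (PySem.Set.discard live v) (work.dropLast ++ neighborsOf v) (removed + 1)
      else peel live work.dropLast removed
    else peel live work.dropLast removed
termination_by 9 * live.length + work.length
decreasing_by
  · have hne : work ≠ [] := by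
      intro h; rw [h] at hw; simp at hw
    have hlen : 1 ≤ work.length := List.length_pos_of_ne_nil hne
    have hlt : (PySem.Set.discard live v).length < live.length := by
      simp only [PySem.Set.discard]
      exact List.length_filter_lt_length_iff_exists.mpr ⟨v, hv, by simp⟩
    simp only [List.length_append, List.length_dropLast, neighborsOf, List.length_cons,
      List.length_nil]
    omega
  · have hne : work ≠ [] := by
      intro h; rw [h] at hw; simp at hw
    have hlen : 1 ≤ work.length := List.length_pos_of_ne_nil hne
    simp only [List.length_dropLast]; omega
  · have hne : work ≠ [] := by
      intro h; rw [h] at hw; simp at hw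
    have hlen : 1 ≤ work.length := List.length_pos_of_ne_nil hne
    simp only [List.length_dropLast]; omega

def count_part2_alt (array : List (List String)) : Int :=
  let R := array.length
  let C := if array.isEmpty then 0 else (array.headD []).length
  peel (initLive array R C) (initWork R C) 0

-- ===== PRECONDITION & SPEC =====
-- Pre_ excludes exactly the inputs where Python A raises IndexError: a row shorter than row 0
-- (A indexes every row at all columns of row 0).
def Pre_count_part2 (array : List (List String)) : Prop :=
  ∀ row ∈ array, (array.headD []).length ≤ row.length
instance (array : List (List String)) : Decidable (Pre_count_part2 array) := by
  unfold Pre_count_part2; infer_instance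

def pvWitness_count_part2 : List (List String) :=
  [["@", "@", "."], ["@", "@", "@"], [".", "@", "@"]]

def Spec_count_part2 (array : List (List String)) (out : Int) : Prop := out = count_part2_alt array
instance (array : List (List String)) (out : Int) : Decidable (Spec_count_part2 array out) := by
  unfold Spec_count_part2; infer_instance

-- ===== CLAIM (what is proved, stated in full; the proofs are below) =====
def Claim_equal_count_part2 : Prop :=
  ∀ (array : List (List String)), Dom_count_part2 array → Pre_count_part2 array →
    Spec_count_part2 array (count_part2 array)

-- ===== LEMMAS AND PROOFS =====

-- proof-side abstraction: Bool grids, coordinate sets, neighbour degrees ------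

def absGrid (array : List (List String)) (C : Nat) : List (List Bool) :=
  array.map (fun row => (List.range C).map (fun y => row.getD y "" == "@"))

def liveI (g : List (List Bool)) : Int :=
  (g.map (fun r => (r.map (fun b => if b then (1 : Int) else 0)).sum)).sum

def pvInd (g : List (List Bool)) (R C : Nat) (a b : Int) : Int :=
  if (0 ≤ a && a < (R : Int) && 0 ≤ b && b < (C : Int) &&
      (g.getD a.toNat []).getD b.toNat false) then 1 else 0

def nbrC (g : List (List Bool)) (R C : Nat) (x y : Int) : Int :=
  pvInd g R C (x-1) (y-1) + pvInd g R C (x-1) y + pvInd g R C (x-1) (y+1) +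
  pvInd g R C x (y-1) + pvInd g R C x (y+1) +
  pvInd g R C (x+1) (y-1) + pvInd g R C (x+1) y + pvInd g R C (x+1) (y+1)

def gstep (g : List (List Bool)) (R C : Nat) : List (List Bool) :=
  (List.range R).map (fun x => (List.range C).map (fun y =>
    (g.getD x []).getD y false && decide (4 ≤ nbrC g R C (x : Int) (y : Int))))

def gfinal (n : Nat) (g : List (List Bool)) (R C : Nat) : List (List Bool) :=
  match n with
  | 0 => g
  | n + 1 => if liveI (gstep g R C) == liveI g then g else gfinal n (gstep g R C) R C

-- coordinate set of a grid, row-major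
def setL (R C : Nat) (g : List (List Bool)) : List (Int × Int) :=
  (List.range R).flatMap (fun x =>
    ((List.range C).filter (fun y => (g.getD x []).getD y false)).map
      (fun (y : Nat) => ((x : Int), (y : Int))))

def deg (S : List (Int × Int)) (v : Int × Int) : Nat :=
  (neighborsOf v).countP (fun u => decide (u ∈ S))

def Stable (S : List (Int × Int)) : Prop := ∀ v ∈ S, 4 ≤ deg S v

-- generic fold/sum helpers ------------------------------------------------

theorem pvFoldlBuild {α β : Type} (f : β → α) (d : β → Int) (step : List α × Int → β → List α × Int)
    (h : ∀ s x, step s x = (s.1 ++ [f x], s.2 + d x)) :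
    ∀ (l : List β) (s : List α × Int), l.foldl step s = (s.1 ++ l.map f, s.2 + (l.map d).sum) := by
  intro l
  induction l with
  | nil => intro s; simp
  | cons a t ih => intro s; simp [h, ih, add_assoc]

theorem pvSumMapRange {α : Type} (l : List α) (F : α → Int) (d : α) :
    (l.map F).sum = ((List.range l.length).map (fun i => F (l.getD i d))).sum := by
  induction l with
  | nil => simp
  | cons a t ih =>
      simp [List.range_succ_eq_map, List.map_map, Function.comp_def, List.getElem?_cons_succ, ih]

theorem pvSumMapSub {β : Type} (l : List β) (f h : β → Int) :
    (l.map (fun y => f y - h y)).sum = (l.map f).sum - (l.map h).sum := by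
  induction l with
  | nil => simp
  | cons b u ih => simp [ih]; ring

theorem pvDoubleSumSub {α β : Type} (l1 : List α) (l2 : List β) (f h : α → β → Int) :
    (l1.map (fun x => ((l2.map (fun y => f x y - h x y))).sum)).sum
      = (l1.map (fun x => (l2.map (f x)).sum)).sum - (l1.map (fun x => (l2.map (h x)).sum)).sum := by
  induction l1 with
  | nil => simp
  | cons a t ih => simp [pvSumMapSub]; ring

theorem pvGetDMap {α β : Type} (l : List α) (f : α → β) (i : Nat) (d0 : α) (d : β)
    (h : i < l.length) : (l.map f).getD i d = f (l.getD i d0) := by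
  rw [List.getD_eq_getElem _ _ (by simpa using h), List.getD_eq_getElem _ _ h]
  simp

theorem pvRangeGetD (C y : Nat) (hy : y < C) : (List.range C).getD y 0 = y := by
  rw [List.getD_eq_getElem _ _ (by simpa using hy)]; simp

-- A's round in closed (map) form ------------------------------------------

def cellA (array : List (List String)) (x y : Nat) : String :=
  let cell := (array.getD x []).getD y ""
  if cell != "@" then cell
  else if count_around array (x : Int) (y : Int) < 4 then "." else "@"

def dA (array : List (List String)) (x y : Nat) : Int :=
  if (array.getD x []).getD y "" != "@" then 0
  else if count_around array (x : Int) (y : Int) < 4 then 1 else 0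

theorem pvInnerStep (array : List (List String)) (x : Nat) :
    ∀ (s : List String × Int) (y : Nat),
      innerStepA array x s y = (s.1 ++ [cellA array x y], s.2 + dA array x y) := by
  intro s y
  unfold innerStepA cellA dA
  by_cases hc : (array[x]?.getD [])[y]?.getD "" = "@"
  · by_cases h4 : count_around array (x : Int) (y : Int) < 4 <;> simp [hc, h4]
  · simp [hc]

theorem pvOuterStep (array : List (List String)) :
    ∀ (s : List (List String) × Int) (x : Nat),
      outerStepA array s x
        = (s.1 ++ [(List.range (array.headD []).length).map (cellA array x)],
           s.2 + ((List.range (array.headD []).length).map (dA array x)).sum) := by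
  intro s x
  unfold outerStepA
  rw [pvFoldlBuild _ _ _ (pvInnerStep array x)]
  simp

theorem pvRoundAEq (array : List (List String)) :
    roundA array
      = ((List.range array.length).map
            (fun x => (List.range (array.headD []).length).map (cellA array x)),
         ((List.range array.length).map
            (fun x => ((List.range (array.headD []).length).map (dA array x)).sum)).sum) := by
  unfold roundA
  rw [pvFoldlBuild _ _ _ (pvOuterStep array)]
  simp

-- grid-cell correspondence -------------------------------------------------

theorem pvGcell (array : List (List String)) (C : Nat) (x y : Nat)
    (hx : x < array.length) (hy : y < C) :
    ((absGrid array C).getD x []).getD y false = ((array.getD x []).getD y "" == "@") := by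
  unfold absGrid
  rw [pvGetDMap _ _ _ ([] : List String) _ hx]
  rw [pvGetDMap _ _ _ (0 : Nat) _ (by simpa using hy)]
  rw [pvRangeGetD C y hy]

theorem pvIpr (array : List (List String)) (C : Nat) (hC : (array.headD []).length = C)
    (a b : Int) :
    (if is_paper_roll array a b then (1 : Int) else 0)
      = pvInd (absGrid array C) array.length C a b := by
  unfold is_paper_roll pvInd
  rw [hC]
  have hg := pvGcell array C a.toNat b.toNat
  by_cases h1 : 0 ≤ a <;> by_cases h2 : a < (array.length : Int) <;>
    by_cases h3 : 0 ≤ b <;> by_cases h4 : b < (C : Int) <;>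
    simp [h1, h2, h3, h4]
  have hx : a.toNat < array.length := by omega
  have hg' := hg hx (by omega)
  simp only [List.getD_eq_getElem?_getD] at hg'
  simp [hg', List.getElem?_eq_getElem hx]

theorem pvCnt (array : List (List String)) (C : Nat) (hC : (array.headD []).length = C)
    (x y : Int) :
    count_around array x y = nbrC (absGrid array C) array.length C x y := by
  unfold count_around nbrC
  simp only [List.map_cons, List.map_nil, List.sum_cons, List.sum_nil,
    pvIpr array C hC]
  ring

-- per-cell indicators and the live-count correspondence ---------------------

def pvS1 (array : List (List String)) (x y : Nat) : Int :=
  if (array.getD x []).getD y "" == "@" then 1 else 0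

def pvS2 (array : List (List String)) (x y : Nat) : Int :=
  if ((array.getD x []).getD y "" == "@")
      && decide (count_around array (x : Int) (y : Int) ≥ 4) then 1 else 0

theorem pvDSplit (array : List (List String)) (x y : Nat) :
    dA array x y = pvS1 array x y - pvS2 array x y := by
  unfold dA pvS1 pvS2
  by_cases hc : (array[x]?.getD [])[y]?.getD "" = "@"
  · by_cases h4 : count_around array (x : Int) (y : Int) < 4
    · have h5 : ¬ ((4 : Int) ≤ count_around array (x : Int) (y : Int)) := by omega
      simp [hc, h4, h5]
    · have h5 : (4 : Int) ≤ count_around array (x : Int) (y : Int) := by omega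
      simp [hc, h4, h5]
  · simp [hc]

theorem pvLiveAbs (array : List (List String)) (C : Nat) :
    liveI (absGrid array C)
      = ((List.range array.length).map (fun x =>
          ((List.range C).map (fun y => pvS1 array x y)).sum)).sum := by
  unfold liveI absGrid pvS1
  rw [List.map_map, pvSumMapRange _ _ ([] : List String)]
  simp [List.map_map, Function.comp_def]

theorem pvLiveStep (array : List (List String)) (C : Nat)
    (hC : (array.headD []).length = C) :
    liveI (gstep (absGrid array C) array.length C)
      = ((List.range array.length).map (fun x =>
          ((List.range C).map (fun y => pvS2 array x y)).sum)).sum := by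
  unfold liveI gstep pvS2
  rw [List.map_map]
  refine congrArg List.sum (List.map_congr_left ?_)
  intro x hx
  rw [List.mem_range] at hx
  show ((((List.range C).map _).map _)).sum = _
  rw [List.map_map]
  refine congrArg List.sum (List.map_congr_left ?_)
  intro y hy
  rw [List.mem_range] at hy
  show (if (((absGrid array C).getD x []).getD y false
      && decide (4 ≤ nbrC (absGrid array C) array.length C (x : Int) (y : Int))) then (1:Int) else 0) = _
  rw [pvGcell array C x y hx hy, ← pvCnt array C hC]

theorem pvCellLive (array : List (List String)) (C : Nat)
    (hC : (array.headD []).length = C) (x y : Nat)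
    (hx : x < array.length) (hy : y < C) :
    (cellA array x y == "@")
      = (((absGrid array C).getD x []).getD y false
          && decide (4 ≤ nbrC (absGrid array C) array.length C (x : Int) (y : Int))) := by
  rw [pvGcell array C x y hx hy, ← pvCnt array C hC]
  unfold cellA
  by_cases hc : (array[x]?.getD [])[y]?.getD "" = "@"
  · by_cases h4 : count_around array (x : Int) (y : Int) < 4
    · have h5 : ¬ ((4:Int) ≤ count_around array (x : Int) (y : Int)) := by omega
      simp [hc, h4, h5]
    · have h5 : (4:Int) ≤ count_around array (x : Int) (y : Int) := by omega
      simp [hc, h4, h5]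
  · simp [hc]

-- K1: A's next grid abstracts to gstep -----------------------------------

theorem pvK1 (array : List (List String)) (C : Nat)
    (hC : (array.headD []).length = C) :
    absGrid (roundA array).1 C = gstep (absGrid array C) array.length C := by
  rw [pvRoundAEq]
  unfold absGrid gstep
  simp only [hC, List.map_map]
  refine List.map_congr_left ?_
  intro x hx
  rw [List.mem_range] at hx
  simp only [Function.comp_def]
  refine List.map_congr_left ?_
  intro y hy
  rw [List.mem_range] at hy
  rw [pvGetDMap _ _ _ (0 : Nat) _ (by simpa using hy), pvRangeGetD C y hy]
  exact pvCellLive array C hC x y hx hy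

-- K2: A's round_count is the drop in live cells ------------------------------

theorem pvK2 (array : List (List String)) (C : Nat)
    (hC : (array.headD []).length = C) :
    (roundA array).2
      = liveI (absGrid array C) - liveI (gstep (absGrid array C) array.length C) := by
  rw [pvRoundAEq, pvLiveAbs array C, pvLiveStep array C hC]
  have hmap : ∀ x : Nat, (List.range C).map (dA array x)
      = (List.range C).map (fun y => pvS1 array x y - pvS2 array x y) :=
    fun x => List.map_congr_left (fun y _ => pvDSplit array x y)
  simp only [hC, hmap]
  exact pvDoubleSumSub _ _ _ _

-- shape of A's next grid ------------------------------------------------------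

theorem pvRoundLen (array : List (List String)) :
    (roundA array).1.length = array.length := by
  rw [pvRoundAEq]; simp

theorem pvRoundHead (array : List (List String)) (hR : array ≠ []) :
    ((roundA array).1.headD []).length = (array.headD []).length := by
  rw [pvRoundAEq]
  cases array with
  | nil => exact absurd rfl hR
  | cons a t => simp [List.range_succ_eq_map]

theorem pvRoundNilSnd : (roundA ([] : List (List String))).2 = 0 := rfl

-- membership and nodup of setL ----------------------------------------------

theorem pvMemSetL (R C : Nat) (g : List (List Bool)) (p : Int × Int) :
    p ∈ setL R C g ↔
      0 ≤ p.1 ∧ p.1 < (R : Int) ∧ 0 ≤ p.2 ∧ p.2 < (C : Int) ∧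
        (g.getD p.1.toNat []).getD p.2.toNat false = true := by
  unfold setL
  simp only [List.mem_flatMap, List.mem_map, List.mem_filter, List.mem_range]
  constructor
  · rintro ⟨x, hx, y, ⟨hy, hcell⟩, hp⟩
    subst hp
    simp only [Int.toNat_natCast]
    exact ⟨by omega, by exact_mod_cast hx, by omega, by exact_mod_cast hy, hcell⟩
  · rintro ⟨h1, h2, h3, h4, hcell⟩
    refine ⟨p.1.toNat, by omega, p.2.toNat, ⟨⟨by omega, hcell⟩, ?_⟩⟩
    rw [Int.toNat_of_nonneg h1, Int.toNat_of_nonneg h3]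

theorem pvNodupSetL (R C : Nat) (g : List (List Bool)) : (setL R C g).Nodup := by
  induction R with
  | zero => simp [setL]
  | succ n ih =>
    show (setL (n+1) C g).Nodup
    unfold setL
    rw [List.range_succ, List.flatMap_append]
    refine List.Nodup.append ?_ ?_ ?_
    · exact ih
    · simp only [List.flatMap_cons, List.flatMap_nil, List.append_nil]
      refine List.Nodup.map ?_ (List.nodup_range.filter _)
      intro a b h
      simpa using h
    · intro a ha hb
      have h1 : a.1 < (n : Int) := ((pvMemSetL n C g a).1 ha).2.1
      simp only [List.flatMap_cons, List.flatMap_nil, List.append_nil, List.mem_map,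
        List.mem_filter, List.mem_range] at hb
      obtain ⟨y, _, hy⟩ := hb
      have : a.1 = (n : Int) := by rw [← hy]
      omega

-- liveI as the length of setL -------------------------------------------------

theorem pvRowSum (row : List Bool) :
    (row.map (fun b => if b then (1 : Int) else 0)).sum
      = ((((List.range row.length).filter (fun y => row.getD y false)).length : Nat) : Int) := by
  rw [pvSumMapRange row _ false, ← List.countP_eq_length_filter]
  exact PySem.List.sum_map_ite_one_zero (fun y => row.getD y false) (List.range row.length)

theorem pvLiveLen (R C : Nat) (g : List (List Bool)) (hR : g.length = R)
    (hrow : ∀ r ∈ g, r.length = C) :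
    liveI g = ((setL R C g).length : Int) := by
  subst hR
  unfold liveI setL
  rw [List.length_flatMap, pvSumMapRange g _ ([] : List Bool), Nat.cast_list_sum, List.map_map]
  refine congrArg List.sum (List.map_congr_left ?_)
  intro x hx
  rw [List.mem_range] at hx
  have hmem : g.getD x [] ∈ g := by
    rw [List.getD_eq_getElem _ _ hx]; exact List.getElem_mem hx
  have hlen : (g.getD x []).length = C := hrow _ hmem
  show (List.map (fun b => if b then (1:Int) else 0) (g.getD x [])).sum = _
  rw [pvRowSum (g.getD x [])]
  simp only [List.getD_eq_getElem?_getD] at hlen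
  simp [hlen]

-- gstep: shape, cells, membership ---------------------------------------------

theorem pvGstepLen (g : List (List Bool)) (R C : Nat) : (gstep g R C).length = R := by
  simp [gstep]

theorem pvGstepRow (g : List (List Bool)) (R C : Nat) :
    ∀ r ∈ gstep g R C, r.length = C := by
  intro r hr
  simp only [gstep, List.mem_map, List.mem_range] at hr
  obtain ⟨x, _, rfl⟩ := hr
  simp

theorem pvGstepGet (g : List (List Bool)) (R C : Nat) (x y : Nat) (hx : x < R) (hy : y < C) :
    ((gstep g R C).getD x []).getD y false
      = ((g.getD x []).getD y false && decide (4 ≤ nbrC g R C (x : Int) (y : Int))) := by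
  unfold gstep
  rw [pvGetDMap _ _ _ (0 : Nat) _ (by simpa using hx), pvRangeGetD R x hx]
  rw [pvGetDMap _ _ _ (0 : Nat) _ (by simpa using hy), pvRangeGetD C y hy]

theorem pvMemStep (g : List (List Bool)) (R C : Nat) (u : Int × Int) :
    u ∈ setL R C (gstep g R C) ↔ u ∈ setL R C g ∧ 4 ≤ nbrC g R C u.1 u.2 := by
  rw [pvMemSetL, pvMemSetL]
  constructor
  · rintro ⟨h1, h2, h3, h4, hc⟩
    rw [pvGstepGet g R C u.1.toNat u.2.toNat (by omega) (by omega)] at hc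
    rw [Int.toNat_of_nonneg h1, Int.toNat_of_nonneg h3] at hc
    simp only [Bool.and_eq_true, decide_eq_true_eq] at hc
    exact ⟨⟨h1, h2, h3, h4, hc.1⟩, hc.2⟩
  · rintro ⟨⟨h1, h2, h3, h4, hc⟩, hn⟩
    refine ⟨h1, h2, h3, h4, ?_⟩
    rw [pvGstepGet g R C u.1.toNat u.2.toNat (by omega) (by omega)]
    rw [Int.toNat_of_nonneg h1, Int.toNat_of_nonneg h3]
    simp only [Bool.and_eq_true, decide_eq_true_eq]
    exact ⟨hc, hn⟩

-- degree bridge ---------------------------------------------------------------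

theorem pvIndMem (g : List (List Bool)) (R C : Nat) (a b : Int) :
    pvInd g R C a b = if ((a, b) ∈ setL R C g) then (1 : Int) else 0 := by
  have hiff : ((0 ≤ a && a < (R : Int) && 0 ≤ b && b < (C : Int) &&
      (g.getD a.toNat []).getD b.toNat false) = true) ↔ ((a, b) ∈ setL R C g) := by
    rw [pvMemSetL]
    simp only [Bool.and_eq_true, decide_eq_true_eq]
    tauto
  unfold pvInd
  simp only [hiff]

theorem pvDegBridge (g : List (List Bool)) (R C : Nat) (v : Int × Int) :
    nbrC g R C v.1 v.2 = ((deg (setL R C g) v : Nat) : Int) := by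
  unfold deg
  rw [← PySem.List.sum_map_ite_one_zero (fun u => decide (u ∈ setL R C g)) (neighborsOf v)]
  unfold neighborsOf nbrC
  simp only [List.map_cons, List.map_nil, List.sum_cons, List.sum_nil, decide_eq_true_eq,
    pvIndMem]
  ring

theorem pvDegMono (S T : List (Int × Int)) (h : ∀ u ∈ S, u ∈ T) (v : Int × Int) :
    deg S v ≤ deg T v := by
  refine List.countP_mono_left ?_
  intro u _ hu
  simp only [decide_eq_true_eq] at *
  exact h u hu

theorem pvStepSub (g : List (List Bool)) (R C : Nat) (u : Int × Int) :
    u ∈ setL R C (gstep g R C) → u ∈ setL R C g :=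
  fun h => ((pvMemStep g R C u).1 h).1

theorem pvStepContain (g : List (List Bool)) (R C : Nat) (S : List (Int × Int))
    (hS : Stable S) (hsub : ∀ u ∈ S, u ∈ setL R C g) :
    ∀ u ∈ S, u ∈ setL R C (gstep g R C) := by
  intro u hu
  rw [pvMemStep]
  refine ⟨hsub u hu, ?_⟩
  rw [pvDegBridge]
  have h1 : 4 ≤ deg S u := hS u hu
  have h2 := pvDegMono S _ hsub u
  omega

-- cardinality arguments --------------------------------------------------------

theorem pvLenEqOfMem (l1 l2 : List (Int × Int)) (h1 : l1.Nodup) (h2 : l2.Nodup)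
    (hm : ∀ x, x ∈ l1 ↔ x ∈ l2) : l1.length = l2.length := by
  have hf : l1.toFinset = l2.toFinset := Finset.ext (by simp [hm])
  rw [← List.toFinset_card_of_nodup h1, ← List.toFinset_card_of_nodup h2, hf]

theorem pvStepLe (g : List (List Bool)) (R C : Nat) (hR : g.length = R)
    (hrow : ∀ r ∈ g, r.length = C) :
    liveI (gstep g R C) ≤ liveI g := by
  rw [pvLiveLen R C g hR hrow, pvLiveLen R C _ (pvGstepLen g R C) (pvGstepRow g R C)]
  have hsub : (setL R C (gstep g R C)).toFinset ⊆ (setL R C g).toFinset := by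
    intro x hx
    rw [List.mem_toFinset] at *
    exact pvStepSub g R C x hx
  have hcard := Finset.card_le_card hsub
  rw [List.toFinset_card_of_nodup (pvNodupSetL R C _),
    List.toFinset_card_of_nodup (pvNodupSetL R C _)] at hcard
  exact_mod_cast hcard

theorem pvFixMem (g : List (List Bool)) (R C : Nat) (hR : g.length = R)
    (hrow : ∀ r ∈ g, r.length = C)
    (hfix : liveI (gstep g R C) = liveI g) :
    ∀ u, u ∈ setL R C (gstep g R C) ↔ u ∈ setL R C g := by
  have hsub : (setL R C (gstep g R C)).toFinset ⊆ (setL R C g).toFinset := by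
    intro x hx
    rw [List.mem_toFinset] at *
    exact pvStepSub g R C x hx
  have e1 := pvLiveLen R C g hR hrow
  have e2 := pvLiveLen R C (gstep g R C) (pvGstepLen g R C) (pvGstepRow g R C)
  have hlen : (setL R C g).length = (setL R C (gstep g R C)).length := by omega
  have hf : (setL R C (gstep g R C)).toFinset = (setL R C g).toFinset := by
    refine Finset.eq_of_subset_of_card_le hsub ?_
    rw [List.toFinset_card_of_nodup (pvNodupSetL R C _),
      List.toFinset_card_of_nodup (pvNodupSetL R C _)]
    omega
  intro u
  rw [← List.mem_toFinset, ← List.mem_toFinset, hf]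

theorem pvFixStable (g : List (List Bool)) (R C : Nat) (hR : g.length = R)
    (hrow : ∀ r ∈ g, r.length = C)
    (hfix : liveI (gstep g R C) = liveI g) :
    Stable (setL R C g) := by
  intro u hu
  have h2 := (pvFixMem g R C hR hrow hfix u).2 hu
  have h3 := ((pvMemStep g R C u).1 h2).2
  rw [pvDegBridge] at h3
  omega

-- gfinal ------------------------------------------------------------------------

theorem pvGfinalShape (n : Nat) (g : List (List Bool)) (R C : Nat) (hR : g.length = R)
    (hrow : ∀ r ∈ g, r.length = C) :
    (gfinal n g R C).length = R ∧ ∀ r ∈ gfinal n g R C, r.length = C := by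
  induction n generalizing g with
  | zero => exact ⟨hR, hrow⟩
  | succ n ih =>
    simp only [gfinal]
    split
    · exact ⟨hR, hrow⟩
    · exact ih (gstep g R C) (pvGstepLen g R C) (pvGstepRow g R C)

theorem pvGfinalSub (n : Nat) (g : List (List Bool)) (R C : Nat) :
    ∀ u ∈ setL R C (gfinal n g R C), u ∈ setL R C g := by
  induction n generalizing g with
  | zero => intro u h; exact h
  | succ n ih =>
    simp only [gfinal]
    split
    · intro u h; exact h
    · intro u hu
      exact pvStepSub g R C u (ih (gstep g R C) u hu)

theorem pvGfinalContain (n : Nat) (g : List (List Bool)) (R C : Nat) (S : List (Int × Int))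
    (hS : Stable S) :
    (∀ u ∈ S, u ∈ setL R C g) → ∀ u ∈ S, u ∈ setL R C (gfinal n g R C) := by
  induction n generalizing g with
  | zero => intro h; exact h
  | succ n ih =>
    simp only [gfinal]
    split
    · intro h; exact h
    · intro h
      exact ih (gstep g R C) (pvStepContain g R C S hS h)

theorem pvGfinalFix (n : Nat) (g : List (List Bool)) (R C : Nat) (hR : g.length = R)
    (hrow : ∀ r ∈ g, r.length = C) (hn : (liveI g).toNat < n) :
    liveI (gstep (gfinal n g R C) R C) = liveI (gfinal n g R C) := by
  induction n generalizing g with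
  | zero => omega
  | succ n ih =>
    simp only [gfinal]
    split
    · next h => exact beq_iff_eq.mp h
    · next h =>
      have hne : liveI (gstep g R C) ≠ liveI g := by simpa using h
      have hle := pvStepLe g R C hR hrow
      have hpos : 0 ≤ liveI (gstep g R C) := by
        rw [pvLiveLen R C _ (pvGstepLen g R C) (pvGstepRow g R C)]
        positivity
      exact ih (gstep g R C) (pvGstepLen g R C) (pvGstepRow g R C) (by omega)

-- absGrid shape and bound --------------------------------------------------------

theorem pvAbsLen (array : List (List String)) (C : Nat) :
    (absGrid array C).length = array.length := by simp [absGrid]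

theorem pvAbsRow (array : List (List String)) (C : Nat) :
    ∀ r ∈ absGrid array C, r.length = C := by
  intro r hr
  simp only [absGrid, List.mem_map] at hr
  obtain ⟨row, _, rfl⟩ := hr
  simp

theorem pvSetLLen (R C : Nat) (g : List (List Bool)) : (setL R C g).length ≤ R * C := by
  unfold setL
  rw [List.length_flatMap]
  have hb : ∀ x ∈ (List.range R).map
      (fun x => (((List.range C).filter (fun y => (g.getD x []).getD y false)).map
        (fun (y : Nat) => ((x : Int), (y : Int)))).length), x ≤ C := by
    intro x hx
    simp only [List.mem_map, List.mem_range, List.length_map] at hx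
    obtain ⟨a, _, rfl⟩ := hx
    calc ((List.range C).filter _).length ≤ (List.range C).length := List.length_filter_le _ _
    _ = C := List.length_range
  have := List.sum_le_card_nsmul _ C hb
  simpa using this

-- A's loop reaches the synchronous fixpoint ---------------------------------------

theorem pvLoopAEq (C : Nat) :
    ∀ (fuel : Nat) (array : List (List String)) (c : Int),
      (array.headD []).length = C →
      loopA fuel array c
        = c + liveI (absGrid array C)
            - liveI (gfinal fuel (absGrid array C) array.length C) := by
  intro fuel
  induction fuel with
  | zero => intro array c hC; simp only [loopA, gfinal]; ring
  | succ fuel ih =>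
    intro array c hC
    simp only [loopA, gfinal]
    have hK2 := pvK2 array C hC
    by_cases h0 : (roundA array).2 = 0
    · have heq : liveI (gstep (absGrid array C) array.length C) = liveI (absGrid array C) := by
        omega
      rw [if_pos (by simpa using h0), if_pos (by simpa using heq), h0]
      ring
    · have hne : liveI (gstep (absGrid array C) array.length C) ≠ liveI (absGrid array C) := by
        omega
      rw [if_neg (by simpa using h0), if_neg (by simpa using hne)]
      have harr : array ≠ [] := by
        intro h; subst h; exact h0 pvRoundNilSnd
      have hC2 : ((roundA array).1.headD []).length = C := by
        rw [pvRoundHead array harr, hC]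
      rw [ih (roundA array).1 (c + (roundA array).2) hC2, pvK1 array C hC, pvRoundLen array]
      omega

-- B's peeling loop: invariants and final characterisation -----------------------

theorem pvNbrSymm (u v : Int × Int) (h : u ∈ neighborsOf v) : v ∈ neighborsOf u := by
  obtain ⟨a, b⟩ := u
  obtain ⟨c, d⟩ := v
  simp only [neighborsOf, List.mem_cons, List.not_mem_nil, or_false, Prod.mk.injEq] at h ⊢
  omega

theorem pvDiscardLen (v : Int × Int) : ∀ (l : List (Int × Int)), l.Nodup → v ∈ l →
    (PySem.Set.discard l v).length = l.length - 1 := by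
  intro l
  induction l with
  | nil => intro _ h; simp at h
  | cons a t ih =>
    intro hnd hv
    simp only [PySem.Set.discard, List.filter_cons]
    rcases List.nodup_cons.mp hnd with ⟨hat, hndt⟩
    by_cases hav : a = v
    · subst hav
      rw [if_neg (by simp)]
      have hft : List.filter (fun y => !(y == a)) t = t := by
        refine List.filter_eq_self.mpr ?_
        intro b hb
        simp only [Bool.not_eq_true', beq_eq_false_iff_ne, ne_eq]
        exact fun h => hat (h ▸ hb)
      simp [hft]
    · have hvt : v ∈ t := by
        rcases List.mem_cons.mp hv with h | h
        · exact absurd h.symm hav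
        · exact h
      rw [if_pos (by simp [hav])]
      simp only [List.length_cons]
      have ih2 := ih hndt hvt
      simp only [PySem.Set.discard] at ih2
      rw [ih2]
      have := List.length_pos_of_mem hvt
      omega

theorem pvDegDiscard (live : List (Int × Int)) (v u : Int × Int) (hnv : v ∉ neighborsOf u) :
    deg (PySem.Set.discard live v) u = deg live u := by
  unfold deg
  refine List.countP_congr ?_
  intro w hw
  simp only [decide_eq_true_eq]
  rw [PySem.Set.mem_discard]
  have hne : w ≠ v := fun h => hnv (h ▸ hw)
  tauto

theorem pvCondDeg (live : List (Int × Int)) (v : Int × Int) :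
    ((((neighborsOf v).filter (fun p => decide (p ∈ live))).length : Int) < 4) ↔ deg live v < 4 := by
  unfold deg
  rw [List.countP_eq_length_filter]
  exact ⟨fun h => by exact_mod_cast h, fun h => by exact_mod_cast h⟩

theorem pvPopMem (work : List (Int × Int)) (v : Int × Int) (hw : work.getLast? = some v) :
    ∀ u ∈ work, u ∈ work.dropLast ∨ u = v := by
  intro u hu
  have hwne : work ≠ [] := by intro h; rw [h] at hw; simp at hw
  have hlast : work.getLast hwne = v := by
    have h2 := List.getLast?_eq_some_getLast hwne
    rw [hw] at h2
    exact (Option.some_injective _ h2.symm)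
  conv at hu => rw [← List.dropLast_append_getLast hwne]
  rw [List.mem_append] at hu
  rcases hu with h | h
  · exact Or.inl h
  · simp only [List.mem_cons, List.not_mem_nil, or_false] at h
    exact Or.inr (h.trans hlast)

theorem pvPeelSpec (live work : List (Int × Int)) (removed : Int) :
    live.Nodup →
    (∀ v ∈ live, deg live v < 4 → v ∈ work) →
    ∃ F : List (Int × Int),
      peel live work removed = removed + (live.length : Int) - (F.length : Int) ∧
      F.Nodup ∧ (∀ u ∈ F, u ∈ live) ∧ Stable F ∧
      (∀ S : List (Int × Int), Stable S → (∀ u ∈ S, u ∈ live) → ∀ u ∈ S, u ∈ F) := by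
  induction live, work, removed using peel.induct with
  | case1 live work removed hw =>
    intro hnd hcomp
    have hwnil : work = [] := List.getLast?_eq_none_iff.mp hw
    subst hwnil
    refine ⟨live, ?_, hnd, fun u h => h, ?_, fun S _ hsub u hu => hsub u hu⟩
    · rw [peel]
      simp only [List.getLast?_nil]
      omega
    · intro v hv
      by_contra hlt
      exact absurd (hcomp v hv (by omega)) (by simp)
  | case2 live work removed v hw hv hcond ih =>
    intro hnd hcomp
    have hdeg : deg live v < 4 := (pvCondDeg live v).1 hcond
    have hnd2 : (PySem.Set.discard live v).Nodup := PySem.Set.nodup_discard live v hnd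
    have hcomp2 : ∀ u ∈ PySem.Set.discard live v,
        deg (PySem.Set.discard live v) u < 4 → u ∈ work.dropLast ++ neighborsOf v := by
      intro u hu hdu
      rw [PySem.Set.mem_discard] at hu
      obtain ⟨hul, hune⟩ := hu
      by_cases hnb : v ∈ neighborsOf u
      · exact List.mem_append_right _ (pvNbrSymm v u hnb)
      · rw [pvDegDiscard live v u hnb] at hdu
        rcases pvPopMem work v hw u (hcomp u hul hdu) with h | h
        · exact List.mem_append_left _ h
        · exact absurd h hune
    obtain ⟨F, hval, hFnd, hFsub, hFst, hFcon⟩ := ih hnd2 hcomp2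
    have hlen : (PySem.Set.discard live v).length = live.length - 1 := pvDiscardLen v live hnd hv
    have hlive1 : 1 ≤ live.length := List.length_pos_of_mem hv
    refine ⟨F, ?_, hFnd, ?_, hFst, ?_⟩
    · rw [peel, hw]
      simp only [hv, hcond, dite_true, if_true]
      rw [hval, hlen, Nat.cast_sub hlive1]
      ring
    · intro u hu
      have h2 := hFsub u hu
      rw [PySem.Set.mem_discard] at h2
      exact h2.1
    · intro S hSst hSsub u hu
      have hvnotS : v ∉ S := by
        intro hvS
        have h1 := hSst v hvS
        have h2 := pvDegMono S live hSsub v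
        omega
      refine hFcon S hSst ?_ u hu
      intro w hw2
      rw [PySem.Set.mem_discard]
      exact ⟨hSsub w hw2, fun h => hvnotS (h ▸ hw2)⟩
  | case3 live work removed v hw hv hcond ih =>
    intro hnd hcomp
    have hcomp2 : ∀ u ∈ live, deg live u < 4 → u ∈ work.dropLast := by
      intro u hu hdu
      rcases pvPopMem work v hw u (hcomp u hu hdu) with h | h
      · exact h
      · subst h
        exact absurd ((pvCondDeg live u).2 hdu) hcond
    obtain ⟨F, hval, hFnd, hFsub, hFst, hFcon⟩ := ih hnd hcomp2
    refine ⟨F, ?_, hFnd, hFsub, hFst, hFcon⟩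
    rw [peel, hw]
    simp only [hv, hcond, dite_true, if_false]
    exact hval
  | case4 live work removed v hw hv ih =>
    intro hnd hcomp
    have hcomp2 : ∀ u ∈ live, deg live u < 4 → u ∈ work.dropLast := by
      intro u hu hdu
      rcases pvPopMem work v hw u (hcomp u hu hdu) with h | h
      · exact h
      · subst h
        exact absurd hu hv
    obtain ⟨F, hval, hFnd, hFsub, hFst, hFcon⟩ := ih hnd hcomp2
    refine ⟨F, ?_, hFnd, hFsub, hFst, hFcon⟩
    rw [peel, hw]
    simp only [hv, dite_false]
    exact hval

-- initial live set and worklist ---------------------------------------------------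

theorem pvInitWorkMem (R C : Nat) (p : Int × Int) :
    p ∈ initWork R C ↔ 0 ≤ p.1 ∧ p.1 < (R : Int) ∧ 0 ≤ p.2 ∧ p.2 < (C : Int) := by
  unfold initWork
  simp only [List.mem_map]
  constructor
  · rintro ⟨q, hq, rfl⟩
    rw [List.mem_product] at hq
    simp only [List.mem_range] at hq
    exact ⟨by simp, by simpa using (Int.ofNat_lt.mpr hq.1), by simp,
      by simpa using (Int.ofNat_lt.mpr hq.2)⟩
  · rintro ⟨h1, h2, h3, h4⟩
    refine ⟨(p.1.toNat, p.2.toNat), ?_, ?_⟩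
    · rw [List.mem_product]
      simp only [List.mem_range]
      omega
    · simp [Int.toNat_of_nonneg h1, Int.toNat_of_nonneg h3]

theorem pvInitLiveMem (array : List (List String)) (C : Nat) (p : Int × Int) :
    p ∈ initLive array array.length C ↔ p ∈ setL array.length C (absGrid array C) := by
  unfold initLive
  rw [PySem.Set.mem_ofList, pvMemSetL]
  simp only [List.mem_map, List.mem_filter]
  constructor
  · rintro ⟨q, ⟨hqp, hcell⟩, rfl⟩
    obtain ⟨x, y⟩ := q
    rw [List.mem_product] at hqp
    simp only [List.mem_range] at hqp
    refine ⟨by simp, by simpa using (Int.ofNat_lt.mpr hqp.1), by simp,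
      by simpa using (Int.ofNat_lt.mpr hqp.2), ?_⟩
    have h6 := pvGcell array C x y hqp.1 hqp.2
    simp only [List.getD_eq_getElem?_getD] at h6
    simpa [h6] using hcell
  · rintro ⟨h1, h2, h3, h4, hc⟩
    refine ⟨(p.1.toNat, p.2.toNat), ⟨?_, ?_⟩, ?_⟩
    · rw [List.mem_product]
      simp only [List.mem_range]
      omega
    · rw [pvGcell array C p.1.toNat p.2.toNat (by omega) (by omega)] at hc
      exact hc
    · simp [Int.toNat_of_nonneg h1, Int.toNat_of_nonneg h3]




-- ===== VERDICT (by name: the statement is the Claim_ definition above) =====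
theorem count_part2_spec : Claim_equal_count_part2 := by
  unfold Claim_equal_count_part2
  intro array _ _
  unfold Spec_count_part2 count_part2 count_part2_alt
  have hCalt : (if array.isEmpty then 0 else (array.headD []).length)
      = (array.headD []).length := by
    cases array <;> simp
  show loopA (array.length * (array.headD []).length + 1) array 0
      = peel (initLive array array.length (if array.isEmpty then 0 else (array.headD []).length))
          (initWork array.length (if array.isEmpty then 0 else (array.headD []).length)) 0
  rw [hCalt]
  have hg0R := pvAbsLen array ((array.headD []).length)
  have hg0row := pvAbsRow array ((array.headD []).length)
  rw [pvLoopAEq ((array.headD []).length)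
    (array.length * (array.headD []).length + 1) array 0 rfl]
  have hwit : ∀ v ∈ initLive array array.length ((array.headD []).length),
      deg (initLive array array.length ((array.headD []).length)) v < 4 →
        v ∈ initWork array.length ((array.headD []).length) := by
    intro v hv _
    rw [pvInitWorkMem]
    have h1 := (pvInitLiveMem array ((array.headD []).length) v).1 hv
    have h2 := (pvMemSetL _ _ _ v).1 h1
    exact ⟨h2.1, h2.2.1, h2.2.2.1, h2.2.2.2.1⟩
  obtain ⟨F, hval, hFnd, hFsub, hFst, hFcon⟩ :=
    pvPeelSpec (initLive array array.length ((array.headD []).length))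
      (initWork array.length ((array.headD []).length)) 0
      (PySem.Set.nodup_ofList _) hwit
  rw [hval]
  have hInitLen : liveI (absGrid array ((array.headD []).length))
      = ((initLive array array.length ((array.headD []).length)).length : Int) := by
    rw [pvLiveLen array.length ((array.headD []).length) _ hg0R hg0row]
    have h3 := pvLenEqOfMem (setL array.length ((array.headD []).length)
        (absGrid array ((array.headD []).length)))
      (initLive array array.length ((array.headD []).length))
      (pvNodupSetL _ _ _) (PySem.Set.nodup_ofList _)
      (fun x => (pvInitLiveMem array ((array.headD []).length) x).symm)
    exact_mod_cast h3
  have hgfShape := pvGfinalShape (array.length * (array.headD []).length + 1)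
    (absGrid array ((array.headD []).length)) array.length ((array.headD []).length) hg0R hg0row
  have hfix := pvGfinalFix (array.length * (array.headD []).length + 1)
    (absGrid array ((array.headD []).length)) array.length ((array.headD []).length) hg0R hg0row
    (by
      have h1 := pvLiveLen array.length ((array.headD []).length) _ hg0R hg0row
      have h2 := pvSetLLen array.length ((array.headD []).length)
        (absGrid array ((array.headD []).length))
      omega)
  have hGfStable : Stable (setL array.length ((array.headD []).length)
      (gfinal (array.length * (array.headD []).length + 1)
        (absGrid array ((array.headD []).length)) array.length ((array.headD []).length))) :=
    pvFixStable _ array.length ((array.headD []).length) hgfShape.1 hgfShape.2 hfix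
  have hGfSub : ∀ u ∈ setL array.length ((array.headD []).length)
      (gfinal (array.length * (array.headD []).length + 1)
        (absGrid array ((array.headD []).length)) array.length ((array.headD []).length)),
      u ∈ initLive array array.length ((array.headD []).length) := by
    intro u hu
    rw [pvInitLiveMem]
    exact pvGfinalSub _ _ array.length ((array.headD []).length) u hu
  have hFGf : ∀ u ∈ F, u ∈ setL array.length ((array.headD []).length)
      (gfinal (array.length * (array.headD []).length + 1)
        (absGrid array ((array.headD []).length)) array.length ((array.headD []).length)) := by
    intro u hu
    refine pvGfinalContain _ _ array.length ((array.headD []).length) F hFst ?_ u hu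
    intro w hwF
    have h5 := hFsub w hwF
    rw [pvInitLiveMem] at h5
    exact h5
  have hGfF := hFcon _ hGfStable hGfSub
  have hlenFGf : (setL array.length ((array.headD []).length)
      (gfinal (array.length * (array.headD []).length + 1)
        (absGrid array ((array.headD []).length)) array.length ((array.headD []).length))).length
      = F.length :=
    pvLenEqOfMem _ _ (pvNodupSetL _ _ _) hFnd (fun x => ⟨hGfF x, hFGf x⟩)
  have hGfLen : liveI (gfinal (array.length * (array.headD []).length + 1)
      (absGrid array ((array.headD []).length)) array.length ((array.headD []).length))
      = (F.length : Int) := by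
    rw [pvLiveLen array.length ((array.headD []).length) _ hgfShape.1 hgfShape.2]
    exact_mod_cast hlenFGf
  omega
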